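-- pv_equiv track=rewrite | github.com/Luongduytoan2006/DUT-AI-CLUB-HOMEWORK | day 6 25-10-2025/homework/b3.py | computeMagnitudeXY
-- ===== SOURCE A (Python) =====
-- import math
--
-- def computeXDerivative(image):
--     h, w = len(image), len(image[0])
--     gx = [[0]*w for _ in range(h)]
--     for i in range(h):
--         for j in range(w):
--             left  = image[i][j-1] if j-1 >= 0 else image[i][j]
--             right = image[i][j+1] if j+1 < w else image[i][j]
--             val = int(right) - int(left)
--             gx[i][j] = max(0, min(255, val + 128))
--     return gx
--
-- def computeYDerivative(image):
--     h, w = len(image), len(image[0])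
--     gy = [[0]*w for _ in range(h)]
--     for i in range(h):
--         for j in range(w):
--             up   = image[i-1][j] if i-1 >= 0 else image[i][j]
--             down = image[i+1][j] if i+1 < h else image[i][j]
--             val = int(down) - int(up)
--             gy[i][j] = max(0, min(255, val + 128))
--     return gy
--
-- def computeMagnitudeXY(image):
--     gx = computeXDerivative(image)
--     gy = computeYDerivative(image)
--     h, w = len(image), len(image[0])
--     mag = [[0]*w for _ in range(h)]
--     for i in range(h):
--         for j in range(w):
--             dx = gx[i][j] - 128
--             dy = gy[i][j] - 128
--             val = int(round(math.sqrt(dx*dx + dy*dy)))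
--             mag[i][j] = max(0, min(255, val))
--     return mag
-- ===== SOURCE B (Python) =====
-- import math
--
-- def computeMagnitudeXY(image):
--     h, w = len(image), len(image[0])
--     mag = []
--     for i in range(h):
--         row = []
--         for j in range(w):
--             left  = image[i][j-1] if j-1 >= 0 else image[i][j]
--             right = image[i][j+1] if j+1 < w else image[i][j]
--             up    = image[i-1][j] if i-1 >= 0 else image[i][j]
--             down  = image[i+1][j] if i+1 < h else image[i][j]
--             dx = max(-128, min(127, int(right) - int(left)))
--             dy = max(-128, min(127, int(down) - int(up)))
--             row.append(max(0, min(255, int(round(math.sqrt(dx*dx + dy*dy))))))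
--         mag.append(row)
--     return mag
-- ===== Notes on version B (the rewrite author's own statement) =====
-- stated objective: simpler
-- what changed: B fuses A's three full-image passes (gx array, gy array, combine) into one nested loop that computes both clamped derivatives and the magnitude per pixel, with no helper functions and no intermediate arrays; the [0,255]+128 clamp is replaced by the equivalent direct clamp to [-128,127].
-- outside the precondition, e.g. on computeMagnitudeXY([]): A raises IndexError, B raises IndexError; on computeMagnitudeXY([[1, 2], [3]]): A raises IndexError, B raises IndexError
import Mathlib
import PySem

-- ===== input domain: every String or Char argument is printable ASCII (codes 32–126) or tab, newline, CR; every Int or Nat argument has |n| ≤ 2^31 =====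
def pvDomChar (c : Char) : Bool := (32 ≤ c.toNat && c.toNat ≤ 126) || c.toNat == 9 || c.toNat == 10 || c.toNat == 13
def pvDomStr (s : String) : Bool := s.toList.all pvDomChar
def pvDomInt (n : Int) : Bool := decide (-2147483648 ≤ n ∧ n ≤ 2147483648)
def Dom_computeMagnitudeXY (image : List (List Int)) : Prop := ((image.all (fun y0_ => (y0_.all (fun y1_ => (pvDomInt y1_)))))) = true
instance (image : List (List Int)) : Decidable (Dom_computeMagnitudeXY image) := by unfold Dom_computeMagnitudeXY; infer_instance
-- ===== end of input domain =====

-- B fuses A's three passes into one nested loop with no intermediate gx/gy arrays (same O(h*w) work, simpler).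
-- Pre_ excludes only inputs where the Python A raises IndexError: the empty image and images with a row
-- shorter than the first row.

-- ===== PORT A =====
-- exact port of int(round(math.sqrt(n))) for 0 <= n <= 32768 (both Pythons' magnitudes lie in [0, 2*128^2]):
-- in that range the float sqrt is never a half-integer, so round() picks the nearest integer to sqrt n.
def pyRoundSqrt (n : Int) : Int :=
  let r := Nat.sqrt n.toNat
  if n.toNat > r * r + r then (r : Int) + 1 else (r : Int)

def computeXDerivative (image : List (List Int)) : List (List Int) :=
  let h := image.length
  let w := (image.headD []).length
  (List.range h).map (fun i =>
    (List.range w).map (fun j =>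
      let row := image.getD i []
      let left  := if 1 ≤ j then row.getD (j - 1) 0 else row.getD j 0
      let right := if j + 1 < w then row.getD (j + 1) 0 else row.getD j 0
      let val := right - left
      max 0 (min 255 (val + 128))))

def computeYDerivative (image : List (List Int)) : List (List Int) :=
  let h := image.length
  let w := (image.headD []).length
  (List.range h).map (fun i =>
    (List.range w).map (fun j =>
      let up   := if 1 ≤ i then (image.getD (i - 1) []).getD j 0 else (image.getD i []).getD j 0
      let down := if i + 1 < h then (image.getD (i + 1) []).getD j 0 else (image.getD i []).getD j 0
      let val := down - up
      max 0 (min 255 (val + 128))))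

def computeMagnitudeXY (image : List (List Int)) : List (List Int) :=
  let gx := computeXDerivative image
  let gy := computeYDerivative image
  let h := image.length
  let w := (image.headD []).length
  (List.range h).map (fun i =>
    (List.range w).map (fun j =>
      let dx := (gx.getD i []).getD j 0 - 128
      let dy := (gy.getD i []).getD j 0 - 128
      let val := pyRoundSqrt (dx * dx + dy * dy)
      max 0 (min 255 val)))

-- ===== PORT B =====
def computeMagnitudeXY_alt (image : List (List Int)) : List (List Int) :=
  let h := image.length
  let w := (image.headD []).length
  (List.range h).map (fun i =>
    (List.range w).map (fun j =>
      let row := image.getD i []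
      let left  := if 1 ≤ j then row.getD (j - 1) 0 else row.getD j 0
      let right := if j + 1 < w then row.getD (j + 1) 0 else row.getD j 0
      let up   := if 1 ≤ i then (image.getD (i - 1) []).getD j 0 else row.getD j 0
      let down := if i + 1 < h then (image.getD (i + 1) []).getD j 0 else row.getD j 0
      let dx := max (-128) (min 127 (right - left))
      let dy := max (-128) (min 127 (down - up))
      max 0 (min 255 (pyRoundSqrt (dx * dx + dy * dy)))))

-- ===== PRECONDITION & SPEC =====
-- Pre_ excludes exactly the inputs on which Python A raises IndexError: image == [] (len(image[0]))
-- and rows shorter than the first row (image[i][j] / image[i][j+1] with j+1 < w out of range).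
def Pre_computeMagnitudeXY (image : List (List Int)) : Prop :=
  image ≠ [] ∧ ∀ row ∈ image, (image.headD []).length ≤ row.length
instance (image : List (List Int)) : Decidable (Pre_computeMagnitudeXY image) := by
  unfold Pre_computeMagnitudeXY; infer_instance
def pvWitness_computeMagnitudeXY : List (List Int) := [[0, 10], [255, 3]]
def Spec_computeMagnitudeXY (image : List (List Int)) (out : List (List Int)) : Prop := out = computeMagnitudeXY_alt image
instance (image : List (List Int)) (out : List (List Int)) : Decidable (Spec_computeMagnitudeXY image out) := by unfold Spec_computeMagnitudeXY; infer_instance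

-- ===== CLAIM (what is proved, stated in full; the proofs are below) =====
def Claim_equal_computeMagnitudeXY : Prop := ∀ (image : List (List Int)), Dom_computeMagnitudeXY image → Pre_computeMagnitudeXY image → Spec_computeMagnitudeXY image (computeMagnitudeXY image)

-- ===== LEMMAS AND PROOFS =====
theorem clamp_shift (v : Int) : max 0 (min 255 (v + 128)) - 128 = max (-128) (min 127 v) := by
  omega

theorem getD_map_range {α : Type} (h i : ℕ) (f : ℕ → α) (d : α) (hi : i < h) :
    (((List.range h).map f).getD i d) = f i := by
  simp [List.getD, hi]

theorem magXY_eq_alt (image : List (List Int)) :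
    computeMagnitudeXY image = computeMagnitudeXY_alt image := by
  unfold computeMagnitudeXY computeMagnitudeXY_alt
  apply List.map_congr_left
  intro i hi
  apply List.map_congr_left
  intro j hj
  rw [List.mem_range] at hi hj
  unfold computeXDerivative computeYDerivative
  rw [getD_map_range _ _ _ _ hi, getD_map_range _ _ _ _ hj,
      getD_map_range _ _ _ _ hi, getD_map_range _ _ _ _ hj]
  simp only
  rw [clamp_shift, clamp_shift]

-- ===== VERDICT (by name: the statement is the Claim_ definition above) =====
theorem computeMagnitudeXY_spec : Claim_equal_computeMagnitudeXY := by
  intro image _ _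
  unfold Spec_computeMagnitudeXY
  exact magXY_eq_alt image
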